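-- pv_equiv track=rewrite | github.com/raeez/chiral-bar-cobar | compute/scripts/_archive/automorphic_bar.py | invert_series
-- ===== SOURCE A (Python) =====
-- from typing import Dict, List, Tuple
--
-- def invert_series(a: List[int], max_n: int = None) -> List[int]:
--     """Compute 1/f as formal power series, where f[0] = 1."""
--     if max_n is None:
--         max_n = len(a) - 1
--     inv = [0] * (max_n + 1)
--     inv[0] = 1
--     for n in range(1, max_n + 1):
--         s = sum(a[k] * inv[n - k] for k in range(1, min(n + 1, len(a))))
--         inv[n] = -s
--     return inv
-- ===== SOURCE B (Python) =====
-- def _mul_trunc(p, q, n):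
--     """First n coefficients of the product of the series p and q."""
--     return [sum(p[i] * q[j - i] for i in range(min(j + 1, len(p))) if j - i < len(q))
--             for j in range(n)]
--
--
-- def invert_series(a, max_n=None):
--     """Compute 1/f as formal power series, where f[0] = 1.
--
--     Newton iteration: inv <- inv * (2 - f*inv), doubling the precision
--     each round until max_n+1 coefficients are correct.
--     """
--     if max_n is None:
--         max_n = len(a) - 1
--     L = max_n + 1
--     f = [1] + a[1:L]
--     inv = [1]
--     prec = 1
--     while prec < L:
--         prec = min(2 * prec, L)
--         t = _mul_trunc(f, inv, prec)
--         g = [2 - t[0]] + [-c for c in t[1:]]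
--         inv = _mul_trunc(inv, g, prec)
--     return inv
-- ===== Notes on version B (the rewrite author's own statement) =====
-- stated objective: alternative
-- what changed: B computes the reciprocal by Newton iteration (inv <- inv*(2 - f*inv), doubling the number of correct coefficients each round, via a truncated-product helper) instead of A's coefficient-by-coefficient convolution recurrence.
import Mathlib
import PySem

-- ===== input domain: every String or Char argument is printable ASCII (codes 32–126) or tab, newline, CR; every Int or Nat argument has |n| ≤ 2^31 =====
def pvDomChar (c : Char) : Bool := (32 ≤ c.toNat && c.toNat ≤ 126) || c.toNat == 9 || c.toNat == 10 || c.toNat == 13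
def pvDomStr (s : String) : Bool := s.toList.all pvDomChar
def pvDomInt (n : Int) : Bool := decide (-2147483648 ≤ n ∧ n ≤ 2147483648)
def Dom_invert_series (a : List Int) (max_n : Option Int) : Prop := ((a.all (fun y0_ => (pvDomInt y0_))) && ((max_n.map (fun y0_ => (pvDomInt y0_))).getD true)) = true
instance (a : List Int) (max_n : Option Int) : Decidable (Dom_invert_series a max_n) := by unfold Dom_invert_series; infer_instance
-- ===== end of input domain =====

-- B replaces A's coefficient-by-coefficient convolution recurrence by Newton iteration
-- (inv <- inv*(2 - f*inv), doubling the correct precision each round); objective: alternative.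

-- ===== PORT A =====
-- s = sum(a[k] * inv[n-k] for k in range(1, min(n + 1, len(a))))
def pvAinner (a inv : List Int) (n : Nat) : Int :=
  (List.range' 1 (min (n + 1) a.length - 1)).foldl
    (fun s k => s + a.getD k 0 * inv.getD (n - k) 0) 0

-- body of A's loop over n: inv[n] = -s
def pvAstep (a : List Int) (inv : List Int) (n : Nat) : List Int :=
  inv.set n (-(pvAinner a inv n))

def invert_series (a : List Int) (max_n : Option Int) : List Int :=
  let m : Int := match max_n with | none => (a.length : Int) - 1 | some v => v
  -- inv = [0] * (max_n + 1); inv[0] = 1; for n in range(1, max_n + 1): ...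
  (List.range' 1 ((m + 1).toNat - 1)).foldl (pvAstep a)
    ((List.replicate (m + 1).toNat 0).set 0 1)

-- ===== PORT B =====
-- _mul_trunc(p, q, n): [sum(p[i]*q[j-i] for i in range(min(j+1,len(p))) if j-i < len(q)) for j in range(n)]
def mulTrunc (p q : List Int) (n : Nat) : List Int :=
  (List.range n).map (fun j =>
    (List.range (min (j + 1) p.length)).foldl
      (fun s i => if j - i < q.length then s + p.getD i 0 * q.getD (j - i) 0 else s) 0)

-- the `while prec < L` loop; the fuel L only bounds the number of iterations (each round
-- strictly increases prec toward L, so L iterations always suffice) to make it structural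
def newtonFuel : Nat → List Int → Nat → List Int → Nat → List Int
  | 0, _, _, inv, _ => inv
  | fuel + 1, f, L, inv, prec =>
    if prec < L then
      let p' := min (2 * prec) L
      let t := mulTrunc f inv p'
      let g := (2 - t.getD 0 0) :: t.tail.map (fun c => -c)
      newtonFuel fuel f L (mulTrunc inv g p') p'
    else inv

def invert_series_alt (a : List Int) (max_n : Option Int) : List Int :=
  let m : Int := match max_n with | none => (a.length : Int) - 1 | some v => v
  let L : Nat := (m + 1).toNat
  -- f = [1] + a[1:L]
  let f : List Int := 1 :: PySem.List.slice a (some 1) (some (m + 1))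
  -- inv = [1]; prec = 1; while prec < L: ...
  newtonFuel L f L [1] 1

-- ===== PRECONDITION & SPEC =====
-- Pre_ excludes exactly the inputs where Python A raises IndexError writing the leading
-- coefficient into a freshly built empty list, which happens iff the effective max_n is
-- negative (max_n omitted with an empty a, or an explicit negative max_n).
def Pre_invert_series (a : List Int) (max_n : Option Int) : Prop :=
  0 < (match max_n with | none => (a.length : Int) - 1 | some v => v) + 1
instance (a : List Int) (max_n : Option Int) : Decidable (Pre_invert_series a max_n) := by
  unfold Pre_invert_series; infer_instance

def pvWitness_invert_series : List Int × Option Int := ([1, 2, 3], none)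

def Spec_invert_series (a : List Int) (max_n : Option Int) (out : List Int) : Prop := out = invert_series_alt a max_n
instance (a : List Int) (max_n : Option Int) (out : List Int) : Decidable (Spec_invert_series a max_n out) := by unfold Spec_invert_series; infer_instance

-- ===== CLAIM (what is proved, stated in full; the proofs are below) =====
def Claim_equal_invert_series : Prop := ∀ (a : List Int) (max_n : Option Int), Dom_invert_series a max_n → Pre_invert_series a max_n → Spec_invert_series a max_n (invert_series a max_n)

-- ===== LEMMAS AND PROOFS =====

theorem getD_set_ne (l : List Int) (i j : Nat) (v : Int) (h : i ≠ j) :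
    (l.set i v).getD j 0 = l.getD j 0 := by
  simp [List.getD_eq_getElem?_getD, List.getElem?_set_ne h]

theorem getD_set_self (l : List Int) (i : Nat) (v : Int) (h : i < l.length) :
    (l.set i v).getD i 0 = v := by
  simp [List.getD_eq_getElem?_getD, h]

-- the initial array [1, 0, …, 0] of A's loop
def init0 (L : Nat) : List Int := (List.replicate L 0).set 0 1

theorem length_init0 (L : Nat) : (init0 L).length = L := by simp [init0]

theorem init0_getD (L j : Nat) (hL : 0 < L) :
    (init0 L).getD j 0 = if j = 0 then 1 else 0 := by
  rcases Nat.eq_zero_or_pos j with rfl | hj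
  · simpa using getD_set_self (List.replicate L 0) 0 1 (by simpa using hL)
  · rw [init0, getD_set_ne _ _ _ _ (by omega), if_neg (by omega)]
    simp only [List.getD_eq_getElem?_getD, List.getElem?_replicate]
    split <;> rfl

-- a fold whose body preserves length preserves length
theorem length_foldl {α : Type} (f : List Int → α → List Int)
    (hf : ∀ r x, (f r x).length = r.length) :
    ∀ (l : List α) (r : List Int), (l.foldl f r).length = r.length := by
  intro l
  induction l with
  | nil => intro r; rfl
  | cons x xs ih => intro r; rw [List.foldl_cons, ih, hf]

-- A's inner sum, as a sum over a map
def conv (a l : List Int) (n : Nat) : Int :=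
  ((List.range' 1 (min (n + 1) a.length - 1)).map
    (fun k => a.getD k 0 * l.getD (n - k) 0)).sum

theorem pvAinner_eq_conv (a l : List Int) (n : Nat) : pvAinner a l n = conv a l n := by
  simpa using PySem.List.foldl_add
    (l := List.range' 1 (min (n + 1) a.length - 1))
    (g := fun k => a.getD k 0 * l.getD (n - k) 0) (a := 0)

theorem conv_congr (a l₁ l₂ : List Int) (n : Nat)
    (h : ∀ j, j < n → l₁.getD j 0 = l₂.getD j 0) : conv a l₁ n = conv a l₂ n := by
  unfold conv
  congr 1
  apply List.map_congr_left
  intro k hk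
  rw [List.mem_range'_1] at hk
  rw [h (n - k) (by omega)]

-- the recurrence inv[0] = 1, inv[n] = -Σ_{k=1}^{min(n, len a - 1)} a[k]·inv[n-k];
-- both ports' outputs satisfy it, and it has a unique solution of each length
def RecInv (a l : List Int) : Prop :=
  ∀ n, n < l.length → l.getD n 0 = if n = 0 then 1 else -conv a l n

theorem recInv_unique (a l₁ l₂ : List Int) (h₁ : RecInv a l₁) (h₂ : RecInv a l₂)
    (hl : l₁.length = l₂.length) : l₁ = l₂ := by
  have key : ∀ n, n < l₁.length → l₁.getD n 0 = l₂.getD n 0 := by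
    intro n
    induction n using Nat.strong_induction_on with
    | _ n ih =>
      intro hn
      rw [h₁ n hn, h₂ n (hl ▸ hn)]
      rcases Nat.eq_zero_or_pos n with rfl | hpos
      · simp
      · rw [if_neg (by omega), if_neg (by omega), neg_inj]
        exact conv_congr a l₁ l₂ n (fun j hj => ih j hj (lt_trans hj hn))
  apply List.ext_getElem hl
  intro i h1 h2
  have := key i h1
  rwa [List.getD_eq_getElem l₁ 0 h1, List.getD_eq_getElem l₂ 0 h2] at this

-- ---------- A side ----------
def invA (a : List Int) (L t : Nat) : List Int :=
  (List.range' 1 t).foldl (pvAstep a) (init0 L)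

theorem length_pvAstep (a r : List Int) (n : Nat) : (pvAstep a r n).length = r.length := by
  simp [pvAstep]

theorem length_invA (a : List Int) (L t : Nat) : (invA a L t).length = L := by
  rw [invA, length_foldl _ (length_pvAstep a), length_init0]

theorem invA_getD (a : List Int) (L : Nat) :
    ∀ t, t < L → ∀ j, j < L →
      (invA a L t).getD j 0 =
        if j = 0 then 1 else if j ≤ t then -conv a (invA a L t) j else 0 := by
  intro t
  induction t with
  | zero =>
    intro hL j _
    rw [show invA a L 0 = init0 L from rfl, init0_getD L j hL]
    split_ifs <;> omega
  | succ t ih =>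
    intro hL j hj
    have ht : t < L := by omega
    have hstep : invA a L (t + 1) = pvAstep a (invA a L t) (t + 1) := by
      rw [invA, List.range'_1_concat, List.foldl_append]
      simp [invA, Nat.add_comm 1 t]
    have hlen : (invA a L t).length = L := length_invA a L t
    have hprev : ∀ i, i ≠ t + 1 → (invA a L (t + 1)).getD i 0 = (invA a L t).getD i 0 := by
      intro i hi
      rw [hstep, pvAstep, getD_set_ne _ _ _ _ (by omega)]
    by_cases hj1 : j ≤ t
    · rw [hprev j (by omega), ih ht j hj]
      rcases Nat.eq_zero_or_pos j with rfl | hp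
      · simp
      · have h0 : ¬ j = 0 := by omega
        rw [if_neg h0, if_neg h0, if_pos hj1, if_pos (show j ≤ t + 1 by omega), neg_inj]
        exact conv_congr a _ _ j (fun i hi => (hprev i (by omega)).symm)
    · by_cases hj2 : j = t + 1
      · subst hj2
        have hval : (invA a L (t + 1)).getD (t + 1) 0 = -conv a (invA a L t) (t + 1) := by
          rw [hstep, pvAstep, getD_set_self _ _ _ (by rw [hlen]; omega), pvAinner_eq_conv]
        rw [hval, if_neg (by omega), if_pos (le_refl (t + 1)), neg_inj]
        exact conv_congr a _ _ (t + 1) (fun i hi => (hprev i (by omega)).symm)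
      · rw [hprev j (by omega), ih ht j hj]
        split_ifs <;> omega

theorem recInv_invA (a : List Int) (L : Nat) (hL : 0 < L) : RecInv a (invA a L (L - 1)) := by
  intro n hn
  rw [length_invA] at hn
  rw [invA_getD a L (L - 1) (by omega) n hn]
  rcases Nat.eq_zero_or_pos n with rfl | hp
  · simp
  · have h0 : ¬ n = 0 := by omega
    rw [if_neg h0, if_neg h0, if_pos (show n ≤ L - 1 by omega)]

-- ---------- B side ----------
-- sequence of coefficients of a list
def seq (l : List Int) : ℕ → ℤ := fun n => l.getD n 0

-- Cauchy-product coefficient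
def Cv (f g : ℕ → ℤ) (n : ℕ) : ℤ := ∑ i ∈ Finset.range (n + 1), f i * g (n - i)

theorem Cv_eq_coeff (f g : ℕ → ℤ) (n : ℕ) :
    Cv f g n = PowerSeries.coeff n (PowerSeries.mk f * PowerSeries.mk g) := by
  rw [PowerSeries.coeff_mul, Finset.Nat.sum_antidiagonal_eq_sum_range_succ_mk]
  simp [Cv]

theorem mk_coeff (φ : PowerSeries ℤ) : PowerSeries.mk (fun n => PowerSeries.coeff n φ) = φ := by
  ext n; simp

theorem Cv_congr (f f' g g' : ℕ → ℤ) (n : ℕ)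
    (hf : ∀ i, i ≤ n → f i = f' i) (hg : ∀ i, i ≤ n → g i = g' i) :
    Cv f g n = Cv f' g' n := by
  unfold Cv
  apply Finset.sum_congr rfl
  intro i hi
  rw [Finset.mem_range] at hi
  rw [hf i (by omega), hg (n - i) (by omega)]

theorem listSum_range (m : ℕ) (g : ℕ → ℤ) :
    ((List.range m).map g).sum = ∑ i ∈ Finset.range m, g i := by
  induction m with
  | zero => simp
  | succ m ih => rw [List.range_succ, Finset.sum_range_succ, List.map_append, List.sum_append, ih]; simp

theorem mulTrunc_length (p q : List Int) (n : Nat) : (mulTrunc p q n).length = n := by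
  simp [mulTrunc]

theorem mulTrunc_getD' (p q : List Int) (n j : Nat) (hj : j < n) :
    (mulTrunc p q n).getD j 0 = Cv (seq p) (seq q) j := by
  have h1 : (mulTrunc p q n).getD j 0 =
      (List.range (min (j + 1) p.length)).foldl
        (fun s i => if j - i < q.length then s + p.getD i 0 * q.getD (j - i) 0 else s) 0 := by
    rw [mulTrunc, List.getD_eq_getElem?_getD, List.getElem?_map, List.getElem?_range hj]
    rfl
  rw [h1]
  have h2 : (fun (s : ℤ) (i : ℕ) => if j - i < q.length then s + p.getD i 0 * q.getD (j - i) 0 else s)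
      = fun s i => s + (if j - i < q.length then p.getD i 0 * q.getD (j - i) 0 else 0) := by
    funext s i; split <;> simp
  rw [h2, PySem.List.foldl_add, listSum_range]
  have h3 : ∀ i : ℕ, (if j - i < q.length then p.getD i 0 * q.getD (j - i) 0 else 0)
      = seq p i * seq q (j - i) := by
    intro i
    by_cases h : j - i < q.length
    · rw [if_pos h]; rfl
    · rw [if_neg h, show seq q (j - i) = 0 from List.getD_eq_default q _ (by omega), mul_zero]
  simp only [h3, zero_add]
  unfold Cv
  have hsub : Finset.range (min (j + 1) p.length) ⊆ Finset.range (j + 1) := by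
    intro x hx0
    rw [Finset.mem_range] at hx0
    exact Finset.mem_range.mpr (lt_of_lt_of_le hx0 (Nat.min_le_left _ _))
  refine Finset.sum_subset hsub ?_
  intro x hx hnx
  rw [Finset.mem_range] at hx
  simp only [Finset.mem_range, not_lt] at hnx
  have hpx : p.length ≤ x := by
    rcases Nat.lt_or_ge x p.length with h | h
    · exact absurd hnx (Nat.not_le.mpr (Nat.lt_min.mpr ⟨hx, h⟩))
    · exact h
  rw [show seq p x = 0 from List.getD_eq_default p _ hpx, zero_mul]

theorem coeff_two (n : ℕ) : PowerSeries.coeff n (2 : PowerSeries ℤ) = if n = 0 then 2 else 0 := by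
  rw [show (2 : PowerSeries ℤ) = 1 + 1 from by ring, map_add, PowerSeries.coeff_one]
  split <;> ring

theorem newton_step (f inv : List Int) (prec p' : Nat)
    (hp2 : p' ≤ 2 * prec)
    (hgood : ∀ n < prec, Cv (seq f) (seq inv) n = if n = 0 then 1 else 0) :
    ∀ n < p', Cv (seq f)
      (seq (mulTrunc inv
        ((2 - (mulTrunc f inv p').getD 0 0) :: (mulTrunc f inv p').tail.map (fun c => -c)) p')) n
      = if n = 0 then 1 else 0 := by
  set Fs := PowerSeries.mk (seq f) with hFs
  set Is := PowerSeries.mk (seq inv) with hIs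
  set t := mulTrunc f inv p' with htdef
  have ht : ∀ n < p', t.getD n 0 = PowerSeries.coeff n (Fs * Is) := by
    intro n hn
    rw [htdef, mulTrunc_getD' f inv p' n hn, Cv_eq_coeff]
  set g := (2 - t.getD 0 0) :: t.tail.map (fun c => -c) with hgdef
  set Ds := 2 - Fs * Is with hDs
  have hg : ∀ n < p', seq g n = PowerSeries.coeff n Ds := by
    intro n hn
    rw [hDs, map_sub, coeff_two]
    cases n with
    | zero =>
      rw [show seq g 0 = 2 - t.getD 0 0 from rfl, ht 0 hn, if_pos rfl]
    | succ k =>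
      have hlt : k + 1 < t.length := by rw [htdef, mulTrunc_length]; omega
      have h1 : seq g (k + 1) = -(t.getD (k + 1) 0) := by
        rw [seq, hgdef, List.getD_cons_succ, List.getD_eq_getElem?_getD, List.getElem?_map,
          List.getElem?_tail, List.getElem?_eq_getElem hlt]
        simp [List.getD_eq_getElem?_getD, List.getElem?_eq_getElem hlt]
      rw [h1, ht (k + 1) hn, if_neg (Nat.succ_ne_zero k)]
      ring
  have hinv' : ∀ n < p', seq (mulTrunc inv g p') n = PowerSeries.coeff n (Is * Ds) := by
    intro n hn
    rw [show seq (mulTrunc inv g p') n = (mulTrunc inv g p').getD n 0 from rfl,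
      mulTrunc_getD' inv g p' n hn,
      Cv_congr (seq inv) (seq inv) (seq g) (fun k => PowerSeries.coeff k Ds) n
        (fun _ _ => rfl) (fun i hi => hg i (lt_of_le_of_lt hi hn)),
      Cv_eq_coeff, mk_coeff]
  intro n hn
  have h1 : Cv (seq f) (seq (mulTrunc inv g p')) n = PowerSeries.coeff n (Fs * (Is * Ds)) := by
    rw [Cv_congr (seq f) (seq f) (seq (mulTrunc inv g p')) (fun k => PowerSeries.coeff k (Is * Ds)) n
        (fun _ _ => rfl) (fun i hi => hinv' i (lt_of_le_of_lt hi hn)),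
      Cv_eq_coeff, mk_coeff]
  have hE : ∀ m, m < prec → PowerSeries.coeff m (Fs * Is - 1) = 0 := by
    intro m hm
    have h := hgood m hm
    rw [Cv_eq_coeff] at h
    rw [map_sub, h, PowerSeries.coeff_one]
    simp
  have hsq : PowerSeries.coeff n ((Fs * Is - 1) * (Fs * Is - 1)) = 0 := by
    have h2 : Cv (fun k => PowerSeries.coeff k (Fs * Is - 1)) (fun k => PowerSeries.coeff k (Fs * Is - 1)) n
        = PowerSeries.coeff n ((Fs * Is - 1) * (Fs * Is - 1)) := by
      rw [Cv_eq_coeff, mk_coeff]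
    rw [← h2, Cv]
    apply Finset.sum_eq_zero
    intro i hi
    rw [Finset.mem_range] at hi
    rcases Nat.lt_or_ge i prec with h | h
    · rw [hE i h, zero_mul]
    · rw [hE (n - i) (by omega), mul_zero]
  have hring : Fs * (Is * Ds) = 1 - (Fs * Is - 1) * (Fs * Is - 1) := by
    rw [hDs]; ring
  rw [h1, hring, map_sub, hsq, PowerSeries.coeff_one, sub_zero]

theorem newtonFuel_good (f : List Int) (L : Nat) :
    ∀ (fuel : Nat) (prec : Nat) (inv : List Int),
      1 ≤ prec → prec ≤ L → L - prec ≤ fuel → inv.length = prec →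
      (∀ n < prec, Cv (seq f) (seq inv) n = if n = 0 then 1 else 0) →
      (newtonFuel fuel f L inv prec).length = L ∧
      (∀ n < L, Cv (seq f) (seq (newtonFuel fuel f L inv prec)) n = if n = 0 then 1 else 0) := by
  intro fuel
  induction fuel with
  | zero =>
    intro prec inv h1 h2 h3 hlen hgood
    have : prec = L := by omega
    subst this
    exact ⟨hlen, hgood⟩
  | succ fuel ih =>
    intro prec inv h1 h2 h3 hlen hgood
    by_cases hlt : prec < L
    · have hstep : newtonFuel (fuel + 1) f L inv prec
          = newtonFuel fuel f L
              (mulTrunc inv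
                ((2 - (mulTrunc f inv (min (2 * prec) L)).getD 0 0)
                  :: (mulTrunc f inv (min (2 * prec) L)).tail.map (fun c => -c))
                (min (2 * prec) L))
              (min (2 * prec) L) := by
        rw [newtonFuel, if_pos hlt]
      rw [hstep]
      have hmin1 : prec ≤ min (2 * prec) L := le_min (by omega) (by omega)
      have hmin2 : min (2 * prec) L ≤ L := Nat.min_le_right _ _
      have hmin3 : prec < min (2 * prec) L := lt_min (by omega) hlt
      exact ih (min (2 * prec) L)
        (mulTrunc inv _ (min (2 * prec) L))
        (by omega) hmin2 (by omega) (mulTrunc_length _ _ _)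
        (newton_step f inv prec (min (2 * prec) L) (Nat.min_le_left _ _) hgood)
    · have : prec = L := by omega
      subst this
      rw [newtonFuel, if_neg hlt]
      exact ⟨hlen, hgood⟩

-- coefficients of the list f = [1] + a[1:L]
theorem seq_f (a : List Int) (m : Int) (k : Nat) (h1 : 1 ≤ k) (h2 : k < (m + 1).toNat) :
    seq (1 :: PySem.List.slice a (some 1) (some (m + 1))) k = a.getD k 0 := by
  have hL : (m + 1) = (((m + 1).toNat : Nat) : Int) := by omega
  rw [hL, show (some (1 : Int)) = some ((1 : Nat) : Int) from by norm_num,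
    PySem.List.slice_natCast]
  rcases Nat.exists_eq_add_of_le h1 with ⟨j, rfl⟩
  rw [seq, Nat.add_comm 1 j, List.getD_cons_succ]
  rw [List.getD_eq_getElem?_getD, List.getElem?_take, if_pos (by omega), List.getElem?_drop,
    List.getD_eq_getElem?_getD, Nat.add_comm 1 j]

theorem sum_shift (u : ℕ → ℤ) : ∀ n : ℕ,
    ∑ i ∈ Finset.range n, u (i + 1) = ((List.range' 1 n).map u).sum := by
  intro n
  induction n with
  | zero => simp
  | succ n ih =>
    rw [Finset.sum_range_succ, List.range'_1_concat, List.map_append, List.sum_append, ih]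
    simp only [List.map_cons, List.map_nil, List.sum_cons, List.sum_nil, add_zero,
      Nat.add_comm 1 n]

theorem sum_trunc (a : List Int) (x : ℕ → ℤ) : ∀ n : ℕ,
    ((List.range' 1 n).map (fun k => a.getD k 0 * x k)).sum
      = ((List.range' 1 (min (n + 1) a.length - 1)).map (fun k => a.getD k 0 * x k)).sum := by
  intro n
  induction n with
  | zero => simp
  | succ n ih =>
    rw [List.range'_1_concat, List.map_append, List.sum_append, ih]
    by_cases h : 1 + n < a.length
    · rw [show min (n + 1 + 1) a.length - 1 = (min (n + 1) a.length - 1) + 1 by omega,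
        List.range'_1_concat, List.map_append, List.sum_append,
        show 1 + (min (n + 1) a.length - 1) = 1 + n by omega]
    · rw [show min (n + 1 + 1) a.length - 1 = min (n + 1) a.length - 1 by omega]
      have hz : a.getD (1 + n) 0 = 0 := List.getD_eq_default a _ (by omega)
      simp only [List.map_cons, List.map_nil, List.sum_cons, List.sum_nil, hz, zero_mul, add_zero]

theorem recInv_of_good (a r : List Int) (m : Int)
    (hlen : r.length = (m + 1).toNat)
    (hgood : ∀ n < (m + 1).toNat,
      Cv (seq (1 :: PySem.List.slice a (some 1) (some (m + 1)))) (seq r) n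
        = if n = 0 then 1 else 0) :
    ∀ n, n < r.length → r.getD n 0 = if n = 0 then 1 else -conv a r n := by
  intro n hn
  rw [hlen] at hn
  have h := hgood n hn
  rw [Cv, Finset.sum_range_succ'] at h
  have h0 : seq (1 :: PySem.List.slice a (some 1) (some (m + 1))) 0 * seq r (n - 0) = r.getD n 0 := by
    rw [show seq (1 :: PySem.List.slice a (some 1) (some (m + 1))) 0 = 1 from rfl, one_mul]
    rfl
  rw [h0] at h
  rcases Nat.eq_zero_or_pos n with rfl | hp
  · simpa using h
  · rw [if_neg (by omega)] at h ⊢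
    have hsum : ∑ i ∈ Finset.range n,
        seq (1 :: PySem.List.slice a (some 1) (some (m + 1))) (i + 1) * seq r (n - (i + 1))
        = conv a r n := by
      have e1 : ∑ i ∈ Finset.range n,
          seq (1 :: PySem.List.slice a (some 1) (some (m + 1))) (i + 1) * seq r (n - (i + 1))
          = ∑ i ∈ Finset.range n, (fun k => a.getD k 0 * r.getD (n - k) 0) (i + 1) := by
        apply Finset.sum_congr rfl
        intro i hi
        rw [Finset.mem_range] at hi
        show seq (1 :: PySem.List.slice a (some 1) (some (m + 1))) (i + 1) * seq r (n - (i + 1))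
            = a.getD (i + 1) 0 * r.getD (n - (i + 1)) 0
        rw [seq_f a m (i + 1) (by omega) (by omega)]
        rfl
      rw [e1, sum_shift (fun k => a.getD k 0 * r.getD (n - k) 0) n,
        sum_trunc a (fun k => r.getD (n - k) 0) n]
      rfl
    rw [hsum] at h
    omega

-- ---------- assembling ----------
theorem ports_eq (a : List Int) (m : Int) (hm : 0 < m + 1) :
    (List.range' 1 ((m + 1).toNat - 1)).foldl (pvAstep a)
        ((List.replicate (m + 1).toNat 0).set 0 1)
      = newtonFuel (m + 1).toNat (1 :: PySem.List.slice a (some 1) (some (m + 1)))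
          (m + 1).toNat [1] 1 := by
  have hL : 0 < (m + 1).toNat := by omega
  have hbase : ∀ n < 1, Cv (seq (1 :: PySem.List.slice a (some 1) (some (m + 1)))) (seq [1]) n
      = if n = 0 then 1 else 0 := by
    intro n hn
    have : n = 0 := by omega
    subst this
    rw [Cv, Finset.sum_range_one]
    rfl
  have hB := newtonFuel_good (1 :: PySem.List.slice a (some 1) (some (m + 1))) (m + 1).toNat
    (m + 1).toNat 1 [1] (le_refl 1) hL (by omega) rfl hbase
  show invA a (m + 1).toNat ((m + 1).toNat - 1) = _
  exact recInv_unique a _ _ (recInv_invA a (m + 1).toNat hL)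
    (recInv_of_good a _ m hB.1 hB.2)
    (by rw [length_invA, hB.1])

-- ===== VERDICT (by name: the statement is the Claim_ definition above) =====
theorem invert_series_spec : Claim_equal_invert_series := by
  intro a max_n _ hpre
  unfold Spec_invert_series
  rcases max_n with _ | v
  · have hm : 0 < ((a.length : Int) - 1) + 1 := hpre
    simp only [invert_series, invert_series_alt]
    exact ports_eq a ((a.length : Int) - 1) hm
  · have hm : 0 < v + 1 := hpre
    simp only [invert_series, invert_series_alt]
    exact ports_eq a v hm
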